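-- pv_equiv track=rewrite | github.com/IdushaGaravi/In23-S1-CS1033---Programming-Fundamentals---Labs | Lab9/Exercise L9.E2/Exercise L9.E2.py | check_for_conditions
-- ===== SOURCE A (Python) =====
-- def check_for_conditions(category, elements):
--     ''' check conditions.
--         if condition satisfy remove those elements and keep rest.
--         if criteria not meet return false and return all elements.
--         if criteria meet, then return true and rest of elements after removing'''
--     temp_elements = [ele.copy() for ele in elements]
--
--     for element, no_of_molecules in category.items():
--         found = False
--         for ele in temp_elements:
--             if ele[0] == element and int(ele[1]) >= no_of_molecules:
--                 found = True
--                 ele[1] = str(int(ele[1]) - no_of_molecules)     # substract number given in condition and get remain number of molecules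
--                 if ele[1] == '0':       # if no. of molecules are zero then remove that molecule
--                     temp_elements.remove(ele)
--                 break
--         if not found:
--             return False, elements
--     return True, temp_elements
-- ===== SOURCE B (Python) =====
-- def check_for_conditions(category, elements):
--     '''Same result via a positional index: group element positions by name once,
--        then satisfy each requirement by direct lookup instead of rescanning the list.'''
--     temp = [ele.copy() for ele in elements]
--     positions = {}
--     for i, ele in enumerate(temp):
--         positions.setdefault(ele[0], []).append(i)
--     drained = []
--     for name, needed in category.items():
--         for i in positions.get(name, []):
--             have = int(temp[i][1])
--             if have >= needed:
--                 temp[i][1] = str(have - needed)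
--                 if temp[i][1] == '0':
--                     drained.append(temp[i])
--                 break
--         else:
--             return False, elements
--     for ele in drained:
--         temp.remove(ele)
--     return True, temp
-- ===== Notes on version B (the rewrite author's own statement) =====
-- stated objective: alternative
-- what changed: Instead of rescanning the whole element list for every requirement, B builds a name-to-positions index once, satisfies each requirement by direct candidate lookup, and defers removals of entries drained to '0' to a single cleanup pass.
-- outside the precondition, e.g. on check_for_conditions({}, [[]]): A returns (True, [[]]), B raises IndexError
import Mathlib
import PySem

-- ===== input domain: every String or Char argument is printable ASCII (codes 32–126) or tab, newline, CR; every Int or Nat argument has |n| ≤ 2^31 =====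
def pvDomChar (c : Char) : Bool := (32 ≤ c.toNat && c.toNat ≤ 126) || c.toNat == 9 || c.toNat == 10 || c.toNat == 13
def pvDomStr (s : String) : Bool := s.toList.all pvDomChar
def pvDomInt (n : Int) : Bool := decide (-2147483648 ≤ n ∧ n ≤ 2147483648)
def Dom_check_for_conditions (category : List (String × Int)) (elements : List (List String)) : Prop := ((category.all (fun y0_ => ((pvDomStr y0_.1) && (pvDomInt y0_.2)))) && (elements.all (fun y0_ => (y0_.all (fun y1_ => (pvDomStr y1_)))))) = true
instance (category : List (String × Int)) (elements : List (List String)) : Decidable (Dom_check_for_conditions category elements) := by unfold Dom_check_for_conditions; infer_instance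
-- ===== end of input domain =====

-- B replaces A's per-requirement rescans of the whole element list by a positional index
-- (name -> element positions) built once, satisfying each requirement by direct candidate lookup
-- and deferring removals to one cleanup pass (objective: alternative).

-- ===== PORT A =====
-- inner 'for ele in temp_elements: ... break' loop; pre = already-traversed prefix, so pre ++ ne :: rest
-- is the whole list, on which Python's list.remove acts (remove? is some since ne is present)
def scanA (name : String) (req : Int) (pre : List (List String)) : List (List String) → Option (List (List String))
  | [] => none
  | ele :: rest =>
    let v := (PySem.Int.ofStr? ((PySem.List.pyGet? ele 1).getD "")).getD 0   -- int(ele[1]); exact under Pre_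
    if (PySem.List.pyGet? ele 0).getD "" = name ∧ req ≤ v then               -- ele[0] == element and int(ele[1]) >= no
      let ne := ele.set 1 (PySem.Int.toStr (v - req))                        -- ele[1] = str(int(ele[1]) - no); exact under Pre_ (2 ≤ len)
      let full := pre ++ ne :: rest
      some (if PySem.Int.toStr (v - req) = "0" then (PySem.List.remove? full ne).getD full else full)
    else
      scanA name req (pre ++ [ele]) rest

-- outer 'for element, no_of_molecules in category.items()' loop; none = the early 'return False, elements'
def loopA : List (String × Int) → List (List String) → Option (List (List String))
  | [], temp => some temp
  | (name, req) :: cats, temp =>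
    match scanA name req [] temp with
    | none => none
    | some t => loopA cats t

def check_for_conditions (category : List (String × Int)) (elements : List (List String)) : Bool × List (List String) :=
  match loopA category elements with
  | none => (false, elements)
  | some t => (true, t)

-- ===== PORT B =====
-- 'for i in positions.get(name, []): ... break / else: return False' loop of Source B
def findB (req : Int) (arr : List (List String)) : List Int → Option (List (List String) × Option (List String))
  | [] => none
  | i :: is =>
    let ele := (PySem.List.pyGet? arr i).getD []                             -- temp[i]; index built in range
    let hv := (PySem.Int.ofStr? ((PySem.List.pyGet? ele 1).getD "")).getD 0  -- have = int(temp[i][1]); exact under Pre_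
    if req ≤ hv then
      let ne := ele.set 1 (PySem.Int.toStr (hv - req))                       -- temp[i][1] = str(have - needed); exact under Pre_
      some (PySem.List.pySetD arr i ne, if PySem.Int.toStr (hv - req) = "0" then some ne else none)
    else findB req arr is

-- 'for name, needed in category.items()' loop of Source B; drained collects entries subtracted to '0'
def loopB : List (String × Int) → PySem.Dict String (List Int) → List (List String) → List (List String) → Option (List (List String) × List (List String))
  | [], _, arr, drained => some (arr, drained)
  | (name, needed) :: cats, occ, arr, drained =>
    match findB needed arr (occ.getD name []) with
    | none => none
    | some r => loopB cats occ r.1 (drained ++ r.2.toList)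

def check_for_conditions_alt (category : List (String × Int)) (elements : List (List String)) : Bool × List (List String) :=
  -- positions.setdefault(ele[0], []).append(i) over enumerate(temp)
  let occ := (PySem.List.enumerate elements).foldl
      (fun d p => d.modify ((PySem.List.pyGet? p.2 0).getD "") [] (fun l => l ++ [p.1])) PySem.Dict.empty
  match loopB category occ elements [] with
  | none => (false, elements)
  | some r => (true, r.2.foldl (fun t v => (PySem.List.remove? t v).getD t) r.1)

-- ===== PRECONDITION & SPEC =====
-- Pre_ restricts to the function's intended input shape: requirement names are the keys of a Python
-- dict (hence distinct), and every element record is nonempty with, whenever its name occurs among the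
-- requirements, a present and int-parsable count string.  This excludes exactly the inputs where A or B
-- raises (IndexError/ValueError), plus some where a malformed record is never inspected because an
-- earlier requirement already failed (A returns (False, elements) there; B may raise on an empty record).
def Pre_check_for_conditions (category : List (String × Int)) (elements : List (List String)) : Prop :=
  (category.map Prod.fst).Nodup ∧
  ∀ e ∈ elements, e ≠ [] ∧ (e.getD 0 "" ∈ category.map Prod.fst →
    2 ≤ e.length ∧ (PySem.Int.ofStr? (e.getD 1 "")).isSome)
instance (category : List (String × Int)) (elements : List (List String)) : Decidable (Pre_check_for_conditions category elements) := by unfold Pre_check_for_conditions; infer_instance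

def pvWitness_check_for_conditions : (List (String × Int)) × List (List String) :=
  ([("H", 2), ("O", 1)], [["C", "4"], ["H", "2"], ["O", "3"]])

def Spec_check_for_conditions (category : List (String × Int)) (elements : List (List String)) (out : Bool × List (List String)) : Prop := out = check_for_conditions_alt category elements
instance (category : List (String × Int)) (elements : List (List String)) (out : Bool × List (List String)) : Decidable (Spec_check_for_conditions category elements out) := by unfold Spec_check_for_conditions; infer_instance

-- ===== CLAIM (what is proved, stated in full; the proofs are below) =====
def Claim_equal_check_for_conditions : Prop := ∀ (category : List (String × Int)) (elements : List (List String)), Dom_check_for_conditions category elements → Pre_check_for_conditions category elements → Spec_check_for_conditions category elements (check_for_conditions category elements)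

-- ===== LEMMAS AND PROOFS =====

-- abbreviations for the two field reads both programs perform
def hdE (e : List String) : String := (PySem.List.pyGet? e 0).getD ""
def valE (e : List String) : Int := (PySem.Int.ofStr? ((PySem.List.pyGet? e 1).getD "")).getD 0
def updE (req : Int) (e : List String) : List String := e.set 1 (PySem.Int.toStr (valE e - req))

-- list.remove (first occurrence equal to w), as a structural function
def rmF {α : Type} [DecidableEq α] (w : α) : List α → List α
  | [] => []
  | x :: t => if x = w then t else x :: rmF w t

def remAll (vs : List (List String)) (xs : List (List String)) : List (List String) :=
  vs.foldl (fun t v => rmF v t) xs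

-- first element matching 'head = name and value ≥ req', with its surroundings
def splitFM (name : String) (req : Int) : List (List String) → Option (List (List String) × List String × List (List String))
  | [] => none
  | e :: t =>
    if hdE e = name ∧ req ≤ valE e then some ([], e, t)
    else (splitFM name req t).map (fun r => (e :: r.1, r.2.1, r.2.2))

-- the joint effect of one requirement on the element list (A's inner loop, abstractly)
def stepF (name : String) (req : Int) (xs : List (List String)) : Option (List (List String)) :=
  (splitFM name req xs).map (fun r =>
    let ne := updE req r.2.1
    let out := r.1 ++ ne :: r.2.2
    if PySem.Int.toStr (valE r.2.1 - req) = "0" then rmF ne out else out)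

-- positions of name-n elements, in order (what B's index stores under n)
def occL (name : String) (xs : List (List String)) : List Int :=
  ((PySem.List.enumerate xs).filter (fun p => hdE p.2 == name)).map (fun p => p.1)

theorem rmF_eq_remove (w : List String) (xs : List (List String)) :
    rmF w xs = (PySem.List.remove? xs w).getD xs := by
  induction xs with
  | nil => rfl
  | cons x t ih =>
    by_cases h : x = w
    · subst h; simp [rmF, PySem.List.remove?_cons_self]
    · rw [PySem.List.remove?_cons_of_ne t h]
      simp only [rmF, if_neg h, ih]
      cases PySem.List.remove? t w <;> simp

theorem remAll_eq_foldl (vs xs : List (List String)) :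
    remAll vs xs = vs.foldl (fun t v => (PySem.List.remove? t v).getD t) xs := by
  induction vs generalizing xs with
  | nil => rfl
  | cons v vs ih => simp only [remAll, List.foldl_cons] at *; rw [← rmF_eq_remove, ih]

theorem rmF_comm {α : Type} [DecidableEq α] {v w : α} (h : v ≠ w) (xs : List α) :
    rmF v (rmF w xs) = rmF w (rmF v xs) := by
  induction xs with
  | nil => rfl
  | cons x t ih =>
    by_cases hv : x = v
    · subst hv; simp [rmF, h]
    · by_cases hw : x = w
      · subst hw; simp [rmF, hv]
      · simp [rmF, hv, hw, ih]

theorem rmF_append_left {α : Type} [DecidableEq α] {w : α} {as : List α} (h : w ∈ as) (l : List α) :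
    rmF w (as ++ l) = rmF w as ++ l := by
  induction as with
  | nil => simp at h
  | cons x t ih =>
    by_cases hx : x = w
    · simp [rmF, hx]
    · rcases List.mem_cons.1 h with h' | h'
      · exact absurd h'.symm hx
      · simp [rmF, hx, ih h']

theorem rmF_append_right {α : Type} [DecidableEq α] {w : α} {as : List α} (h : w ∉ as) (l : List α) :
    rmF w (as ++ l) = as ++ rmF w l := by
  induction as with
  | nil => rfl
  | cons x t ih =>
    have hx : x ≠ w := fun e => h (e ▸ List.mem_cons_self)
    have ht : w ∉ t := fun e => h (List.mem_cons_of_mem _ e)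
    simp [rmF, hx, ih ht]

theorem pyGet?_cons_zero {α : Type} (x : α) (t : List α) :
    PySem.List.pyGet? (x :: t) (0 : Int) = some x := by simp [pysem]

theorem pyGet?_cons_succ {α : Type} (x : α) (t : List α) {i : Int} (h : 0 ≤ i) :
    PySem.List.pyGet? (x :: t) (i + 1) = PySem.List.pyGet? t i := by
  obtain ⟨k, rfl⟩ : ∃ k : Nat, (k : Int) = i := ⟨i.toNat, Int.toNat_of_nonneg h⟩
  rw [show (k : Int) + 1 = ((k + 1 : Nat) : Int) by push_cast; ring]
  rw [PySem.List.pyGet?_natCast, PySem.List.pyGet?_natCast]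
  simp

theorem pySetD_cons_succ {α : Type} (x : α) (t : List α) {i : Int} (h : 0 ≤ i) (v : α) :
    PySem.List.pySetD (x :: t) (i + 1) v = x :: PySem.List.pySetD t i v := by
  obtain ⟨k, rfl⟩ : ∃ k : Nat, (k : Int) = i := ⟨i.toNat, Int.toNat_of_nonneg h⟩
  rw [show (k : Int) + 1 = ((k + 1 : Nat) : Int) by push_cast; ring]
  rw [PySem.List.pySetD_natCast, PySem.List.pySetD_natCast]
  simp

theorem hdE_set (e : List String) (s : String) : hdE (e.set 1 s) = hdE e := by
  cases e with
  | nil => rfl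
  | cons a t => cases t <;> simp [hdE, List.set]

theorem hdE_updE (req : Int) (e : List String) : hdE (updE req e) = hdE e := hdE_set e _

-- scanA is stepF relative to the traversed prefix
theorem scanA_eq (name : String) (req : Int) (xs : List (List String)) : ∀ pre,
    scanA name req pre xs = (splitFM name req xs).map (fun r =>
      let ne := updE req r.2.1
      let out := pre ++ r.1 ++ ne :: r.2.2
      if PySem.Int.toStr (valE r.2.1 - req) = "0" then rmF ne out else out) := by
  induction xs with
  | nil => intro pre; simp [scanA, splitFM]
  | cons e rest ih =>
    intro pre
    rw [scanA, splitFM]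
    simp only [hdE, valE]
    split_ifs with hc hz
    · simp only [Option.map_some]
      rw [← rmF_eq_remove]
      simp [updE, valE, hz]
    · simp only [Option.map_some]
      simp [updE, valE, hz]
    · rw [ih (pre ++ [e])]
      cases hs : splitFM name req rest with
      | none => simp
      | some r => simp [valE, List.append_assoc]

theorem scanA_eq_stepF (name : String) (req : Int) (xs : List (List String)) :
    scanA name req [] xs = stepF name req xs := by
  rw [scanA_eq, stepF]
  cases hs : splitFM name req xs <;> simp

theorem splitFM_some (name : String) (req : Int) (xs : List (List String))
    {r : List (List String) × List String × List (List String)} (h : splitFM name req xs = some r) :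
    hdE r.2.1 = name ∧ req ≤ valE r.2.1 ∧ xs = r.1 ++ r.2.1 :: r.2.2 := by
  induction xs generalizing r with
  | nil => simp [splitFM] at h
  | cons e t ih =>
    rw [splitFM] at h
    by_cases hc : hdE e = name ∧ req ≤ valE e
    · rw [if_pos hc] at h
      cases h
      exact ⟨hc.1, hc.2, rfl⟩
    · rw [if_neg hc] at h
      cases hs : splitFM name req t with
      | none => rw [hs] at h; simp at h
      | some r' =>
        rw [hs] at h
        simp only [Option.map_some, Option.some.injEq] at h
        obtain ⟨h1, h2, h3⟩ := ih hs
        subst h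
        exact ⟨h1, h2, by simp [h3]⟩

theorem splitFM_rmF {name : String} (req : Int) {w : List String} (hw : hdE w ≠ name) (xs : List (List String)) :
    splitFM name req (rmF w xs) = (splitFM name req xs).map
      (fun r => if w ∈ r.1 then (rmF w r.1, r.2.1, r.2.2) else (r.1, r.2.1, rmF w r.2.2)) := by
  induction xs with
  | nil => rfl
  | cons x t ih =>
    by_cases hx : x = w
    · subst hx
      have hnm : ¬(hdE x = name ∧ req ≤ valE x) := fun hcon => hw hcon.1
      rw [rmF, if_pos rfl, splitFM, if_neg hnm]
      cases hs : splitFM name req t with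
      | none => simp
      | some r => simp [rmF]
    · rw [rmF, if_neg hx]
      by_cases hm : hdE x = name ∧ req ≤ valE x
      · rw [splitFM, if_pos hm, splitFM, if_pos hm]
        simp
      · rw [splitFM, if_neg hm, splitFM, if_neg hm, ih]
        cases hs : splitFM name req t with
        | none => simp
        | some r =>
          have hx' : ¬w = x := fun hh => hx hh.symm
          by_cases hr : w ∈ r.1 <;> simp [hr, hx, hx', rmF]

theorem stepF_rmF {name : String} (req : Int) {w : List String} (hw : hdE w ≠ name) (xs : List (List String)) :
    stepF name req (rmF w xs) = (stepF name req xs).map (rmF w) := by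
  rw [stepF, stepF, splitFM_rmF req hw]
  cases hs : splitFM name req xs with
  | none => rfl
  | some r =>
    obtain ⟨h1, h2, -⟩ := splitFM_some name req xs hs
    have hne : updE req r.2.1 ≠ w := by
      intro h
      exact hw (by rw [← h, hdE_updE, h1])
    simp only [Option.map_some]
    by_cases hr : w ∈ r.1
    · have hout : rmF w (r.1 ++ updE req r.2.1 :: r.2.2) = rmF w r.1 ++ updE req r.2.1 :: r.2.2 :=
        rmF_append_left hr _
      by_cases hz : PySem.Int.toStr (valE r.2.1 - req) = "0"
      · simp only [if_pos hr, if_pos hz, Option.some.injEq]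
        rw [← hout, rmF_comm hne]
      · simp only [if_pos hr, if_neg hz, Option.some.injEq]
        exact hout.symm
    · have hcons : rmF w (updE req r.2.1 :: r.2.2) = updE req r.2.1 :: rmF w r.2.2 := by
        rw [rmF, if_neg hne]
      have hout : rmF w (r.1 ++ updE req r.2.1 :: r.2.2) = r.1 ++ updE req r.2.1 :: rmF w r.2.2 := by
        rw [rmF_append_right hr, hcons]
      by_cases hz : PySem.Int.toStr (valE r.2.1 - req) = "0"
      · simp only [if_neg hr, if_pos hz, Option.some.injEq]
        rw [← hout, rmF_comm hne]
      · simp only [if_neg hr, if_neg hz, Option.some.injEq]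
        exact hout.symm

theorem stepF_remAll {name : String} (req : Int) {vs : List (List String)}
    (h : ∀ v ∈ vs, hdE v ≠ name) (xs : List (List String)) :
    stepF name req (remAll vs xs) = (stepF name req xs).map (remAll vs) := by
  induction vs generalizing xs with
  | nil => cases hs : stepF name req xs <;> simp [hs, remAll]
  | cons v vs ih =>
    have hstep : remAll (v :: vs) xs = remAll vs (rmF v xs) := rfl
    rw [hstep, ih (fun u hu => h u (List.mem_cons_of_mem _ hu)), stepF_rmF req (h v List.mem_cons_self)]
    cases stepF name req xs <;> simp [remAll]

theorem rmF_remAll_comm {vs : List (List String)} {w : List String}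
    (h : ∀ v ∈ vs, v ≠ w) (t : List (List String)) :
    rmF w (remAll vs t) = remAll vs (rmF w t) := by
  induction vs generalizing t with
  | nil => rfl
  | cons v vs ih =>
    have hstep : ∀ u, remAll (v :: vs) u = remAll vs (rmF v u) := fun _ => rfl
    rw [hstep, hstep, ih (fun u hu => h u (List.mem_cons_of_mem _ hu)),
      rmF_comm (h v List.mem_cons_self)]

theorem enumerate_shift {α : Type} (xs : List α) (s : Int) :
    PySem.List.enumerate xs (s + 1) = (PySem.List.enumerate xs s).map (fun p => (p.1 + 1, p.2)) := by
  induction xs generalizing s with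
  | nil => simp [PySem.List.enumerate_nil]
  | cons x t ih => simp only [PySem.List.enumerate_cons, ih, List.map_cons]

theorem occL_cons (name : String) (e : List String) (t : List (List String)) :
    occL name (e :: t) = (if hdE e == name then [(0 : Int)] else []) ++ (occL name t).map (· + 1) := by
  rw [occL, occL, PySem.List.enumerate_cons, enumerate_shift t 0]
  rw [List.filter_cons, List.filter_map]
  cases hdE e == name <;> simp [List.map_map, Function.comp_def]

theorem occL_nonneg (name : String) (xs : List (List String)) : ∀ i ∈ occL name xs, 0 ≤ i := by
  induction xs with
  | nil => intro i hi; simp [occL] at hi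
  | cons e t ih =>
    intro i hi
    rw [occL_cons] at hi
    rcases List.mem_append.1 hi with h1 | h1
    · split_ifs at h1 <;> simp_all
    · obtain ⟨j, hj, rfl⟩ := List.mem_map.1 h1
      have := ih j hj
      omega

theorem occL_congr (name : String) {xs ys : List (List String)} (h : xs.map hdE = ys.map hdE) :
    occL name xs = occL name ys := by
  induction xs generalizing ys with
  | nil => cases ys with
    | nil => rfl
    | cons y t => simp at h
  | cons x t ih =>
    cases ys with
    | nil => simp at h
    | cons y u =>
      simp only [List.map_cons, List.cons.injEq] at h
      rw [occL_cons, occL_cons, h.1, ih h.2]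

theorem findB_shift (req : Int) (x : List String) (t : List (List String)) {is : List Int}
    (h : ∀ i ∈ is, 0 ≤ i) :
    findB req (x :: t) (is.map (· + 1)) = (findB req t is).map (fun r => (x :: r.1, r.2)) := by
  induction is with
  | nil => rfl
  | cons i is ih =>
    have h0 : 0 ≤ i := h i List.mem_cons_self
    rw [List.map_cons, findB, findB]
    rw [pyGet?_cons_succ x t h0]
    split_ifs with hv
    · simp [pySetD_cons_succ x t h0]
    · simp [pySetD_cons_succ x t h0]
    · exact ih (fun j hj => h j (List.mem_cons_of_mem _ hj))

theorem findB_occ (name : String) (req : Int) (xs : List (List String)) :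
    findB req xs (occL name xs) = (splitFM name req xs).map (fun r =>
      (r.1 ++ updE req r.2.1 :: r.2.2,
       if PySem.Int.toStr (valE r.2.1 - req) = "0" then some (updE req r.2.1) else none)) := by
  induction xs with
  | nil => rfl
  | cons e t ih =>
    rw [occL_cons]
    have hshift : findB req (e :: t) ((occL name t).map (· + 1)) =
        (findB req t (occL name t)).map (fun r => (e :: r.1, r.2)) :=
      findB_shift req e t (occL_nonneg name t)
    by_cases hh : hdE e = name
    · rw [if_pos (by simpa using hh), List.singleton_append, findB, pyGet?_cons_zero]
      split_ifs with hv hz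
      · rw [splitFM, if_pos ⟨hh, hv⟩]
        have hz' : PySem.Int.toStr (valE e - req) = "0" := hz
        simp [pysem, updE, valE]
        simpa [valE, pysem] using hz'
      · rw [splitFM, if_pos ⟨hh, hv⟩]
        have hz' : ¬PySem.Int.toStr (valE e - req) = "0" := hz
        simp [pysem, updE, valE]
        simpa [valE, pysem] using hz'
      · rw [hshift, ih, splitFM, if_neg (fun hcon => hv hcon.2)]
        cases splitFM name req t with
        | none => simp
        | some r => simp
    · rw [if_neg (by simpa using hh), List.nil_append, hshift, ih]
      rw [splitFM, if_neg (fun hcon => hh hcon.1)]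
      cases splitFM name req t with
      | none => simp
      | some r => simp

theorem occ_build (elements : List (List String)) (m : String) :
    ((PySem.List.enumerate elements).foldl
      (fun d p => d.modify ((PySem.List.pyGet? p.2 0).getD "") [] (fun l => l ++ [p.1]))
      PySem.Dict.empty).getD m [] = occL m elements := by
  have hfold : ((PySem.List.enumerate elements).foldl
      (fun d p => d.modify ((PySem.List.pyGet? p.2 0).getD "") [] (fun l => l ++ [p.1]))
      PySem.Dict.empty)
      = (((PySem.List.enumerate elements).map
          (fun p => (((PySem.List.pyGet? p.2 0).getD "" : String), p.1))).foldl
        (fun d q => d.modify q.1 [] (fun l => l ++ [q.2])) PySem.Dict.empty) := by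
    rw [List.foldl_map]
  rw [hfold, PySem.Dict.getD_foldl_modify_append]
  simp [occL, hdE, List.filter_map, List.map_map, Function.comp_def]

theorem main_loop : ∀ (cats : List (String × Int)) (occ : PySem.Dict String (List Int))
    (arr drained : List (List String)),
    (cats.map Prod.fst).Nodup →
    (∀ v ∈ drained, hdE v ∉ cats.map Prod.fst) →
    (∀ m, occ.getD m [] = occL m arr) →
    loopA cats (remAll drained arr) = (loopB cats occ arr drained).map (fun r => remAll r.2 r.1) := by
  intro cats
  induction cats with
  | nil => intro occ arr drained _ _ _; simp [loopA, loopB]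
  | cons c cs ih =>
    intro occ arr drained hnd hdisj hocc
    obtain ⟨name, req⟩ := c
    simp only [List.map_cons, List.nodup_cons] at hnd
    have hdisj1 : ∀ v ∈ drained, hdE v ≠ name := by
      intro v hv hvn
      exact hdisj v hv (by simp [hvn])
    have hdisjcs : ∀ v ∈ drained, hdE v ∉ cs.map Prod.fst := by
      intro v hv hmem
      exact hdisj v hv (by simp [hmem])
    rw [loopA, loopB, scanA_eq_stepF, stepF_remAll req hdisj1, hocc name, findB_occ name req arr]
    cases hs : splitFM name req arr with
    | none => rw [stepF, hs]; rfl
    | some r =>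
      obtain ⟨h1, h2, h3⟩ := splitFM_some name req arr hs
      rw [stepF, hs]
      simp only [Option.map_some]
      have hocc' : ∀ m', occ.getD m' [] = occL m' (r.1 ++ updE req r.2.1 :: r.2.2) := by
        intro m'
        rw [hocc m']
        refine occL_congr m' ?_
        rw [h3]
        simp [hdE_updE]
      have hne_head : hdE (updE req r.2.1) = name := by rw [hdE_updE, h1]
      by_cases hz : PySem.Int.toStr (valE r.2.1 - req) = "0"
      · rw [if_pos hz, if_pos hz]
        have hdrained' : ∀ v ∈ drained ++ [updE req r.2.1], hdE v ∉ cs.map Prod.fst := by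
          intro v hv
          rcases List.mem_append.1 hv with h' | h'
          · exact hdisjcs v h'
          · simp only [List.mem_singleton] at h'
            subst h'
            rw [hne_head]
            exact hnd.1
        have harg : remAll drained (rmF (updE req r.2.1) (r.1 ++ updE req r.2.1 :: r.2.2))
            = remAll (drained ++ [updE req r.2.1]) (r.1 ++ updE req r.2.1 :: r.2.2) := by
          rw [show remAll (drained ++ [updE req r.2.1]) (r.1 ++ updE req r.2.1 :: r.2.2)
              = rmF (updE req r.2.1) (remAll drained (r.1 ++ updE req r.2.1 :: r.2.2)) from by
            rw [remAll, List.foldl_append]; rfl]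
          exact (rmF_remAll_comm
            (fun v hv he => (hdisj1 v hv) (by rw [he]; exact hne_head)) _).symm
        have := ih occ (r.1 ++ updE req r.2.1 :: r.2.2) (drained ++ [updE req r.2.1])
          hnd.2 hdrained' hocc'
        rw [harg, this]
        rfl
      · rw [if_neg hz, if_neg hz]
        have := ih occ (r.1 ++ updE req r.2.1 :: r.2.2) drained hnd.2 hdisjcs hocc'
        rw [this]
        simp

-- ===== VERDICT (by name: the statement is the Claim_ definition above) =====
theorem check_for_conditions_spec : Claim_equal_check_for_conditions := by
  intro category elements _ hpre
  have h0 := occ_build elements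
  have hnd := hpre.1
  have h := main_loop category _ elements [] hnd (fun v hv => absurd hv List.not_mem_nil) h0
  have hzero : remAll [] elements = elements := rfl
  rw [hzero] at h
  unfold Spec_check_for_conditions check_for_conditions check_for_conditions_alt
  rw [h]
  cases hb : loopB category
      ((PySem.List.enumerate elements).foldl
        (fun d p => d.modify ((PySem.List.pyGet? p.2 0).getD "") [] (fun l => l ++ [p.1]))
        PySem.Dict.empty)
      elements [] with
  | none => simp [hb]
  | some r => simp [hb, remAll_eq_foldl]
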